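-- pv_equiv track=rewrite | github.com/jayashreekumaresan2026/pythonbeginner | Hacker_rank_problems/electronic_shop.py | electronic_shop
-- ===== SOURCE A (Python) =====
-- def electronic_shop(amount, keyboard, usb):
--     array = []
--     for i in range(0, len(keyboard)):
--         for j in range(0, len(usb)):
--             if keyboard[i] + usb[j] < amount:
--                 array.append(keyboard[i] + usb[j])
--             else:
--                  continue
--
--     result = max(array)
--     return result
-- ===== SOURCE B (Python) =====
-- def electronic_shop(amount, keyboard, usb):
--     # sort usb once; for each keyboard price binary-search the largest usb price
--     # strictly below amount - k (the while loop is exactly bisect_left).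
--     su = sorted(usb)
--     best = None
--     for k in keyboard:
--         t = amount - k
--         lo, hi = 0, len(su)
--         while lo < hi:
--             mid = (lo + hi) // 2
--             if su[mid] < t:
--                 lo = mid + 1
--             else:
--                 hi = mid
--         if lo > 0:
--             cand = k + su[lo - 1]
--             if best is None or cand > best:
--                 best = cand
--     return best
-- ===== Notes on version B (the rewrite author's own statement) =====
-- stated objective: faster
-- what changed: Replaces the nested loop that materializes every qualifying pair sum and then takes max() with: sort usb once, then for each keyboard price binary-search (bisect_left) the largest usb price strictly below amount-k, keeping a running best.
import Mathlib
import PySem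

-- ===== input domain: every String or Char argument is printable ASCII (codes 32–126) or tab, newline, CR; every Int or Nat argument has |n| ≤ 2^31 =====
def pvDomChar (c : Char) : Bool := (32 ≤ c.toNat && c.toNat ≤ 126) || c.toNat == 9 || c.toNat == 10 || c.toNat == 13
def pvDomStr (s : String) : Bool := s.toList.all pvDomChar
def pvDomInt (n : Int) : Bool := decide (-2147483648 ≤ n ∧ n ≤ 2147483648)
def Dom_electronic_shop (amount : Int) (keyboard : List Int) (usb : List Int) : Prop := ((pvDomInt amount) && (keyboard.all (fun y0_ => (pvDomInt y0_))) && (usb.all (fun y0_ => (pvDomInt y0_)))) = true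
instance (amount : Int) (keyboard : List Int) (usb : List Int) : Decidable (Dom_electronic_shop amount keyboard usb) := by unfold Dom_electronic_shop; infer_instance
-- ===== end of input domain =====

-- B sorts usb once and binary-searches per keyboard price instead of A's nested loop over all pairs; objective: faster.
-- A raises ValueError (max of empty list) when no pair sum is < amount; Pre_ excludes exactly those inputs.


-- ===== PORT A =====
-- nested loops appending qualifying sums, then max(array); max raises on [] (excluded by Pre_, .getD 0 is the totality default there)
def electronic_shop (amount : Int) (keyboard : List Int) (usb : List Int) : Int :=
  let array : List Int :=
    keyboard.foldl (fun acc k =>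
      usb.foldl (fun acc2 u =>
        if k + u < amount then acc2 ++ [k + u] else acc2) acc) []
  (PySem.List.max? array (fun x => x)).getD 0

-- ===== PORT B =====
-- Source B's hand-written while loop is exactly CPython's bisect_left, ported as the prelude primitive PySem.List.bisectLeft;
-- the running best is an Option Int (None in Python); .getD 0 is the totality default outside Pre_ (Python returns None there).
def electronic_shop_alt (amount : Int) (keyboard : List Int) (usb : List Int) : Int :=
  let su := PySem.List.sorted usb (fun x => x) false
  let best : Option Int :=
    keyboard.foldl (fun best k =>
      let lo := PySem.List.bisectLeft su (amount - k)
      if 0 < lo then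
        let cand := k + su.getD (lo - 1) 0
        match best with
        | none => some cand
        | some b => if b < cand then some cand else some b
      else best) none
  best.getD 0

-- ===== PRECONDITION & SPEC =====
-- Pre_: some pair sums strictly below amount; otherwise A's max([]) raises ValueError.
def Pre_electronic_shop (amount : Int) (keyboard : List Int) (usb : List Int) : Prop :=
  ∃ k ∈ keyboard, ∃ u ∈ usb, k + u < amount
instance (amount : Int) (keyboard : List Int) (usb : List Int) : Decidable (Pre_electronic_shop amount keyboard usb) := by unfold Pre_electronic_shop; infer_instance
def pvWitness_electronic_shop : Int × List Int × List Int := (10, [3, 7], [2, 4])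
def Spec_electronic_shop (amount : Int) (keyboard : List Int) (usb : List Int) (out : Int) : Prop := out = electronic_shop_alt amount keyboard usb
instance (amount : Int) (keyboard : List Int) (usb : List Int) (out : Int) : Decidable (Spec_electronic_shop amount keyboard usb out) := by unfold Spec_electronic_shop; infer_instance

-- ===== CLAIM (what is proved, stated in full; the proofs are below) =====
def Claim_equal_electronic_shop : Prop := ∀ (amount : Int) (keyboard : List Int) (usb : List Int), Dom_electronic_shop amount keyboard usb → Pre_electronic_shop amount keyboard usb → Spec_electronic_shop amount keyboard usb (electronic_shop amount keyboard usb)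

-- ===== LEMMAS AND PROOFS =====

-- the list of qualifying sums contributed by one keyboard price k
def pvM (amount k : Int) (usb : List Int) : List Int :=
  (usb.filter (fun u => decide (k + u < amount))).map (fun u => k + u)

-- "o is none iff l is empty, and a some is a maximum element of l"
def pvIsMaxOpt (l : List Int) (o : Option Int) : Prop :=
  match o with
  | none => l = []
  | some r => r ∈ l ∧ ∀ y ∈ l, y ≤ r

-- combining an optional running best with an optional candidate (Source B's if/else chain)
def pvOMax (o₁ o₂ : Option Int) : Option Int :=
  match o₁, o₂ with
  | none, c => c
  | some b, none => some b
  | some b, some c => if b < c then some c else some b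

-- the candidate Source B's binary search produces for one keyboard price k
def pvCand (amount k : Int) (usb : List Int) : Option Int :=
  if 0 < PySem.List.bisectLeft (PySem.List.sorted usb (fun x => x) false) (amount - k)
  then some (k + (PySem.List.sorted usb (fun x => x) false).getD
      (PySem.List.bisectLeft (PySem.List.sorted usb (fun x => x) false) (amount - k) - 1) 0)
  else none

theorem pvIsMaxOpt_append {l₁ l₂ : List Int} {o₁ o₂ : Option Int}
    (h₁ : pvIsMaxOpt l₁ o₁) (h₂ : pvIsMaxOpt l₂ o₂) :
    pvIsMaxOpt (l₁ ++ l₂) (pvOMax o₁ o₂) := by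
  match o₁, o₂ with
  | none, none =>
    have e₁ : l₁ = [] := h₁
    have e₂ : l₂ = [] := h₂
    show l₁ ++ l₂ = []
    simp [e₁, e₂]
  | none, some c =>
    have e₁ : l₁ = [] := h₁
    obtain ⟨hc, hcmax⟩ : c ∈ l₂ ∧ ∀ y ∈ l₂, y ≤ c := h₂
    refine ⟨List.mem_append.mpr (Or.inr hc), fun y hy => ?_⟩
    rcases List.mem_append.mp hy with h | h
    · simp [e₁] at h
    · exact hcmax y h
  | some b, none =>
    have e₂ : l₂ = [] := h₂
    obtain ⟨hb, hbmax⟩ : b ∈ l₁ ∧ ∀ y ∈ l₁, y ≤ b := h₁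
    refine ⟨List.mem_append.mpr (Or.inl hb), fun y hy => ?_⟩
    rcases List.mem_append.mp hy with h | h
    · exact hbmax y h
    · simp [e₂] at h
  | some b, some c =>
    obtain ⟨hb, hbmax⟩ : b ∈ l₁ ∧ ∀ y ∈ l₁, y ≤ b := h₁
    obtain ⟨hc, hcmax⟩ : c ∈ l₂ ∧ ∀ y ∈ l₂, y ≤ c := h₂
    show pvIsMaxOpt (l₁ ++ l₂) (if b < c then some c else some b)
    by_cases hlt : b < c
    · rw [if_pos hlt]
      refine ⟨List.mem_append.mpr (Or.inr hc), fun y hy => ?_⟩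
      rcases List.mem_append.mp hy with h | h
      · exact le_trans (hbmax y h) (le_of_lt hlt)
      · exact hcmax y h
    · rw [if_neg hlt]
      refine ⟨List.mem_append.mpr (Or.inl hb), fun y hy => ?_⟩
      rcases List.mem_append.mp hy with h | h
      · exact hbmax y h
      · exact le_trans (hcmax y h) (by omega)

-- the binary-search candidate is a maximum of pvM amount k usb
theorem pvBisect_step (amount k : Int) (usb : List Int) :
    pvIsMaxOpt (pvM amount k usb) (pvCand amount k usb) := by
  have hperm : (PySem.List.sorted usb (fun x => x) false).Perm usb :=
    PySem.List.sorted_perm usb (fun x => x) false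
  have hpw : List.Pairwise (fun a b => a ≤ b) (PySem.List.sorted usb (fun x => x) false) :=
    PySem.List.sorted_pairwise usb (fun x => x)
  obtain ⟨hlen, hlt, hge⟩ :=
    PySem.List.bisectLeft_spec (PySem.List.sorted usb (fun x => x) false) (amount - k) hpw
  set su := PySem.List.sorted usb (fun x => x) false with hsu
  set lo := PySem.List.bisectLeft su (amount - k) with hlo
  unfold pvCand
  rw [← hsu, ← hlo]
  by_cases hpos : 0 < lo
  · rw [if_pos hpos]
    have hidx : lo - 1 < su.length := by omega
    have hvdef : su.getD (lo - 1) 0 = su[lo - 1] := List.getD_eq_getElem su 0 hidx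
    have hvmem : su[lo - 1] ∈ usb := hperm.mem_iff.mp (List.getElem_mem hidx)
    have hvlt : su[lo - 1] < amount - k := hlt (lo - 1) hidx (by omega)
    refine ⟨?_, ?_⟩
    · simp only [pvM, List.mem_map, List.mem_filter]
      exact ⟨su[lo - 1], ⟨hvmem, by simpa using (by omega : k + su[lo - 1] < amount)⟩, by rw [hvdef]⟩
    · intro y hy
      simp only [pvM, List.mem_map, List.mem_filter, decide_eq_true_eq] at hy
      obtain ⟨u, ⟨humem, hult⟩, rfl⟩ := hy
      obtain ⟨j, hj, hju⟩ := List.mem_iff_getElem.mp (hperm.mem_iff.mpr humem)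
      have hjlt : j < lo := by
        by_contra hc
        have := hge j hj (by omega)
        omega
      have : su[j] ≤ su[lo - 1] := PySem.List.sorted_id_getElem_mono usb (by omega) hidx
      rw [hvdef]; omega
  · rw [if_neg hpos]
    show pvM amount k usb = []
    simp only [pvM]
    rw [List.map_eq_nil_iff, List.filter_eq_nil_iff]
    intro u humem
    obtain ⟨j, hj, hju⟩ := List.mem_iff_getElem.mp (hperm.mem_iff.mpr humem)
    have := hge j hj (by omega)
    simp only [decide_eq_true_eq]
    omega

-- B's per-keyboard loop body is exactly pvOMax with the binary-search candidate
theorem pvAlt_eq (amount : Int) (keyboard usb : List Int) :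
    electronic_shop_alt amount keyboard usb
      = (keyboard.foldl (fun best k => pvOMax best (pvCand amount k usb)) none).getD 0 := by
  unfold electronic_shop_alt
  dsimp only
  congr 1
  apply PySem.List.foldl_congr_mem
  intro best k _
  cases best <;>
    by_cases hpos : 0 < PySem.List.bisectLeft (PySem.List.sorted usb (fun x => x) false) (amount - k) <;>
    simp [pvOMax, pvCand, hpos]

-- B's fold maintains pvIsMaxOpt over the accumulated flatMap of per-keyboard sum lists
theorem pvFold_inv (amount : Int) (usb : List Int) (kb : List Int) :
    ∀ (l : List Int) (best : Option Int), pvIsMaxOpt l best →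
    pvIsMaxOpt (l ++ kb.flatMap (fun k => pvM amount k usb))
      (kb.foldl (fun best k => pvOMax best (pvCand amount k usb)) best) := by
  induction kb with
  | nil => intro l best h; simpa using h
  | cons k kb ih =>
    intro l best h
    have hstep := pvIsMaxOpt_append h (pvBisect_step amount k usb)
    have hrec := ih (l ++ pvM amount k usb) _ hstep
    rw [List.append_assoc] at hrec
    simpa using hrec

-- ===== VERDICT (by name: the statement is the Claim_ definition above) =====
theorem electronic_shop_spec : Claim_equal_electronic_shop := by
  intro amount keyboard usb _ hpre
  unfold Spec_electronic_shop electronic_shop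
  rw [pvAlt_eq]
  -- A's array is the flatMap of per-keyboard qualifying sums
  have harr : keyboard.foldl (fun acc k =>
      usb.foldl (fun acc2 u => if k + u < amount then acc2 ++ [k + u] else acc2) acc) ([] : List Int)
      = keyboard.flatMap (fun k => pvM amount k usb) := by
    calc keyboard.foldl (fun acc k =>
          usb.foldl (fun acc2 u => if k + u < amount then acc2 ++ [k + u] else acc2) acc) []
        = keyboard.foldl (fun acc k => acc ++ pvM amount k usb) [] := by
          apply PySem.List.foldl_congr_mem
          intro acc k _
          exact PySem.List.foldl_append_ite (fun u => k + u < amount) (fun u => k + u) usb acc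
      _ = [] ++ keyboard.flatMap (fun k => pvM amount k usb) :=
          PySem.List.foldl_append_eq_flatMap _ keyboard []
      _ = keyboard.flatMap (fun k => pvM amount k usb) := by simp
  set L := keyboard.flatMap (fun k => pvM amount k usb) with hL
  -- L is nonempty under Pre_
  have hne : L ≠ [] := by
    obtain ⟨k, hk, u, hu, hlt⟩ := hpre
    intro h0
    have : k + u ∈ L := by
      simp only [hL, List.mem_flatMap]
      exact ⟨k, hk, by simp [pvM, List.mem_filter, hlt, hu]⟩
    rw [h0] at this; simp at this
  -- B's fold computes a maximum of L
  have hB := pvFold_inv amount usb keyboard [] none (show ([] : List Int) = [] from rfl)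
  simp only [List.nil_append, ← hL] at hB
  rw [harr]
  cases hA : PySem.List.max? L (fun x => x) with
  | none => exact absurd ((PySem.List.max?_eq_none_iff L _).mp hA) hne
  | some r =>
    have hrmem : r ∈ L := PySem.List.max?_mem hA
    have hrmax : ∀ y ∈ L, y ≤ r := fun y hy => PySem.List.max?_isMax hA y hy
    cases hb : keyboard.foldl (fun best k => pvOMax best (pvCand amount k usb)) none with
    | none =>
      rw [hb] at hB
      exact absurd (show L = [] from hB) hne
    | some r' =>
      rw [hb] at hB
      obtain ⟨hr'mem, hr'max⟩ : r' ∈ L ∧ ∀ y ∈ L, y ≤ r' := hB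
      have heq : r = r' := le_antisymm (hr'max r hrmem) (hrmax r' hr'mem)
      show (PySem.List.max? L (fun x => x)).getD 0 = (some r').getD 0
      rw [hA, heq]
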